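-- pv_equiv track=rewrite | github.com/hahanbyul/algorithm_study | 2017-11-4W/bit_change.py | compute_array_advance
-- ===== SOURCE A (Python) =====
-- def compute_array_advance(N):
--     array        = [0 for _ in range(N+1)]
--     summed_array = [0 for _ in range(N+1)]
--     array[2]        = 2
--     summed_array[2] = 2
--     for i in range(3, N+1):
--         array[i]        = summed_array[i-1] + i
--         summed_array[i] = summed_array[i-1] + array[i]
--
--     return array, summed_array
-- ===== SOURCE B (Python) =====
-- def compute_array_advance(N):
--     array        = [3 * (1 << (i - 2)) - 1 if i >= 2 else 0 for i in range(N + 1)]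
--     summed_array = [3 * (1 << (i - 1)) - i - 2 if i >= 2 else 0 for i in range(N + 1)]
--     return array, summed_array
-- ===== Notes on version B (the rewrite author's own statement) =====
-- stated objective: simpler
-- what changed: Replaces the sequential DP recurrence (each entry computed from summed_array[i-1]) with per-index closed forms array[i]=3*2**(i-2)-1 and summed_array[i]=3*2**(i-1)-i-2 built by independent list comprehensions.
import Mathlib
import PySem

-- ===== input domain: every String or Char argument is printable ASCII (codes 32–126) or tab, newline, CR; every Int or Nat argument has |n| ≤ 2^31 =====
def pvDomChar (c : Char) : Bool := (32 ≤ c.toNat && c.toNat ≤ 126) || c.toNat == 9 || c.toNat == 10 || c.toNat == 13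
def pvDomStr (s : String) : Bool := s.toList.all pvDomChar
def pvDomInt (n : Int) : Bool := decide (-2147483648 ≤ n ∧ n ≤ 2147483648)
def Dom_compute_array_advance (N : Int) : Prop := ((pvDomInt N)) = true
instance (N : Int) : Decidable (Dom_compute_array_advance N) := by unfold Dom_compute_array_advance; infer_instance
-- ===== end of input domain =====

-- B replaces A's sequential DP recurrence by per-index closed forms (simpler: entries are independent).


-- ===== PORT A =====
-- loop body of A's for-loop (array[i] = summed_array[i-1] + i; summed_array[i] = summed_array[i-1] + array[i])
def pvStepA (st : List Int × List Int) (i : Int) : List Int × List Int :=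
  let a := PySem.List.pySetD st.1 i (PySem.List.pyGetD st.2 (i-1) 0 + i)
  let s := PySem.List.pySetD st.2 i (PySem.List.pyGetD st.2 (i-1) 0 + PySem.List.pyGetD a i 0)
  (a, s)

def compute_array_advance (N : Int) : List Int × List Int :=
  let array := (PySem.List.pyRange 0 (N+1) 1).map (fun _ => (0:Int))
  let summed := (PySem.List.pyRange 0 (N+1) 1).map (fun _ => (0:Int))
  let array := PySem.List.pySetD array 2 2
  let summed := PySem.List.pySetD summed 2 2
  (PySem.List.pyRange 3 (N+1) 1).foldl pvStepA (array, summed)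

-- ===== PORT B =====
def compute_array_advance_alt (N : Int) : List Int × List Int :=
  ((PySem.List.pyRange 0 (N+1) 1).map (fun i => if 2 ≤ i then 3 * 2 ^ (i-2).toNat - 1 else 0),
   (PySem.List.pyRange 0 (N+1) 1).map (fun i => if 2 ≤ i then 3 * 2 ^ (i-1).toNat - i - 2 else 0))

-- ===== PRECONDITION & SPEC =====
-- A's assignment array[2] = 2 raises IndexError whenever the allocated length N+1 ≤ 2.
def Pre_compute_array_advance (N : Int) : Prop := 2 ≤ N
instance (N : Int) : Decidable (Pre_compute_array_advance N) := by unfold Pre_compute_array_advance; infer_instance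
def pvWitness_compute_array_advance : Int := 5

def Spec_compute_array_advance (N : Int) (out : List Int × List Int) : Prop := out = compute_array_advance_alt N
instance (N : Int) (out : List Int × List Int) : Decidable (Spec_compute_array_advance N out) := by unfold Spec_compute_array_advance; infer_instance

-- ===== CLAIM (what is proved, stated in full; the proofs are below) =====
def Claim_equal_compute_array_advance : Prop := ∀ (N : Int), Dom_compute_array_advance N → Pre_compute_array_advance N → Spec_compute_array_advance N (compute_array_advance N)

-- ===== LEMMAS AND PROOFS =====

-- target lists after the loop has processed i = 3 .. m
def pvA (m i : Int) : Int := if 2 ≤ i ∧ i ≤ m then 3 * 2 ^ (i-2).toNat - 1 else 0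
def pvS (m i : Int) : Int := if 2 ≤ i ∧ i ≤ m then 3 * 2 ^ (i-1).toNat - i - 2 else 0

-- setting index j of a mapped range yields the mapped range of an updated function
theorem pv_setD_map_pyRange (n : Int) (f g : Int → Int) (j v : Int)
    (h0 : 0 ≤ j) (hj : j < n)
    (hfg : ∀ i, 0 ≤ i → i < n → i ≠ j → f i = g i) (hv : v = g j) :
    PySem.List.pySetD ((PySem.List.pyRange 0 n 1).map f) j v
      = (PySem.List.pyRange 0 n 1).map g := by
  rw [PySem.List.pySetD_of_nonneg]
  · apply List.ext_getElem
    · simp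
    · intro k h1 h2
      simp only [List.getElem_set, List.getElem_map, PySem.List.getElem_pyRange_one, zero_add]
      simp only [List.length_set, List.length_map, PySem.List.length_pyRange_one] at h1
      by_cases hk : j.toNat = k
      · rw [if_pos hk, hv]; congr 1; omega
      · rw [if_neg hk]
        exact hfg k (Int.natCast_nonneg k) (by omega) (by omega)
  · exact h0

theorem pv_getD_pvmap (n i : Int) (f : Int → Int) (h0 : 0 ≤ i) (hi : i < n) :
    PySem.List.pyGetD ((PySem.List.pyRange 0 n 1).map f) i 0 = f i :=
  PySem.List.pyGetD_map_pyRange_of_nonneg f n i 0 h0 hi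

-- loop invariant: after processing i = 3 .. m the state is the closed-form lists up to m
theorem pv_loop_inv (N : Int) (hN : 2 ≤ N) (m : Int) (h2 : 2 ≤ m) (hm : m ≤ N) :
    (PySem.List.pyRange 3 (m+1) 1).foldl pvStepA
      (PySem.List.pySetD ((PySem.List.pyRange 0 (N+1) 1).map (fun _ => (0:Int))) 2 2,
       PySem.List.pySetD ((PySem.List.pyRange 0 (N+1) 1).map (fun _ => (0:Int))) 2 2)
      = ((PySem.List.pyRange 0 (N+1) 1).map (pvA m),
         (PySem.List.pyRange 0 (N+1) 1).map (pvS m)) := by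
  induction m, h2 using Int.le_induction with
  | base =>
      rw [show PySem.List.pyRange 3 (2+1) 1 = ([] : List Int) from
            PySem.List.pyRange_one_eq_nil (by omega)]
      simp only [List.foldl_nil]
      simp only [Prod.mk.injEq]
      constructor
      · exact pv_setD_map_pyRange (N+1) _ (pvA 2) 2 2 (by omega) (by omega)
          (fun i h0i hi hne => by simp only [pvA]; rw [if_neg (by omega)]) (by decide)
      · exact pv_setD_map_pyRange (N+1) _ (pvS 2) 2 2 (by omega) (by omega)
          (fun i h0i hi hne => by simp only [pvS]; rw [if_neg (by omega)]) (by decide)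
  | succ m h2 ih =>
      have hm' : m ≤ N := by omega
      rw [show m + 1 + 1 = (m + 1) + 1 by ring,
          PySem.List.pyRange_one_succ_right (by omega : (3:Int) ≤ m + 1),
          List.foldl_append, ih hm']
      simp only [List.foldl_cons, List.foldl_nil]
      -- one step at i = m+1
      unfold pvStepA
      simp only
      have hgS : PySem.List.pyGetD ((PySem.List.pyRange 0 (N+1) 1).map (pvS m)) (m+1-1) 0
          = 3 * 2 ^ (m-1).toNat - m - 2 := by
        rw [show m + 1 - 1 = m by ring, pv_getD_pvmap (N+1) m (pvS m) (by omega) (by omega)]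
        simp [pvS]; omega
      have hA : PySem.List.pySetD ((PySem.List.pyRange 0 (N+1) 1).map (pvA m)) (m+1)
            (PySem.List.pyGetD ((PySem.List.pyRange 0 (N+1) 1).map (pvS m)) (m+1-1) 0 + (m+1))
          = (PySem.List.pyRange 0 (N+1) 1).map (pvA (m+1)) := by
        apply pv_setD_map_pyRange (N+1) (pvA m) (pvA (m+1)) (m+1) _ (by omega) (by omega)
        · intro i _ _ hne; simp only [pvA]
          by_cases h : 2 ≤ i ∧ i ≤ m
          · rw [if_pos h, if_pos ⟨h.1, by omega⟩]
          · rw [if_neg h, if_neg (by omega)]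
        · rw [hgS]
          simp only [pvA, if_pos (by omega : 2 ≤ m + 1 ∧ m + 1 ≤ m + 1)]
          rw [show m + 1 - 2 = m - 1 by ring]; ring
      rw [hA]
      have hgA : PySem.List.pyGetD ((PySem.List.pyRange 0 (N+1) 1).map (pvA (m+1))) (m+1) 0
          = 3 * 2 ^ (m-1).toNat - 1 := by
        rw [pv_getD_pvmap (N+1) (m+1) (pvA (m+1)) (by omega) (by omega)]
        simp only [pvA, if_pos (by omega : 2 ≤ m + 1 ∧ m + 1 ≤ m + 1)]
        rw [show m + 1 - 2 = m - 1 by ring]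
      refine Prod.ext rfl ?_
      simp only
      apply pv_setD_map_pyRange (N+1) (pvS m) (pvS (m+1)) (m+1) _ (by omega) (by omega)
      · intro i _ _ hne; simp only [pvS]
        by_cases h : 2 ≤ i ∧ i ≤ m
        · rw [if_pos h, if_pos ⟨h.1, by omega⟩]
        · rw [if_neg h, if_neg (by omega)]
      · rw [hgS, hgA]
        simp only [pvS, if_pos (by omega : 2 ≤ m + 1 ∧ m + 1 ≤ m + 1)]
        have : (m + 1 - 1).toNat = (m - 1).toNat + 1 := by omega
        rw [this, pow_succ]; ring

-- ===== VERDICT (by name: the statement is the Claim_ definition above) =====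
theorem compute_array_advance_spec : Claim_equal_compute_array_advance := by
  intro N _ hPre
  unfold Spec_compute_array_advance compute_array_advance compute_array_advance_alt
  simp only
  rw [pv_loop_inv N hPre N hPre le_rfl]
  simp only [Prod.mk.injEq]
  constructor
  · apply List.map_congr_left
    intro i hi
    rw [PySem.List.mem_pyRange_one] at hi
    simp only [pvA]
    by_cases h : 2 ≤ i
    · rw [if_pos ⟨h, by omega⟩, if_pos h]
    · rw [if_neg (by omega), if_neg h]
  · apply List.map_congr_left
    intro i hi
    rw [PySem.List.mem_pyRange_one] at hi
    simp only [pvS]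
    by_cases h : 2 ≤ i
    · rw [if_pos ⟨h, by omega⟩, if_pos h]
    · rw [if_neg (by omega), if_neg h]
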